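-- pv_equiv track=rewrite | github.com/danieleschmidt/Neuro-Symbolic-Law-Prover | src/neuro_symbolic_law/applications/data_sharing.py | _purposes_compatible
-- ===== SOURCE A (Python) =====
-- def _purposes_compatible(use: str, purpose: str) -> bool:
--     """Check if use and purpose are compatible."""
--
--     # Simple keyword matching - in practice would use semantic similarity
--     use_words = set(use.split())
--     purpose_words = set(purpose.split())
--
--     # Check for direct overlap
--     if use_words & purpose_words:
--         return True
--
--     # Check for semantic compatibility
--     compatible_mappings = {
--         'marketing': ['promotion', 'advertising', 'commercial'],
--         'analytics': ['analysis', 'insights', 'reporting'],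
--         'support': ['service', 'assistance', 'help'],
--         'research': ['study', 'investigation', 'development']
--     }
--
--     for use_word in use_words:
--         if use_word in compatible_mappings:
--             if any(compat in purpose_words for compat in compatible_mappings[use_word]):
--                 return True
--
--     return False
-- ===== SOURCE B (Python) =====
-- def _purposes_compatible(use: str, purpose: str) -> bool:
--     """Check if use and purpose are compatible."""
--     # Reverse index: each synonym maps back to its canonical use keyword.
--     # (The synonym lists in the original table are pairwise disjoint, so the
--     # reverse map is a plain dict.)  Then a single scan over the purpose words:
--     # a purpose word matches if it appears among the use words directly, or its
--     # canonical keyword does.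
--     canonical_of = {
--         'promotion': 'marketing', 'advertising': 'marketing', 'commercial': 'marketing',
--         'analysis': 'analytics', 'insights': 'analytics', 'reporting': 'analytics',
--         'service': 'support', 'assistance': 'support', 'help': 'support',
--         'study': 'research', 'investigation': 'research', 'development': 'research',
--     }
--     use_words = set(use.split())
--     return any(w in use_words or canonical_of.get(w) in use_words
--                for w in purpose.split())
-- ===== Notes on version B (the rewrite author's own statement) =====
-- stated objective: alternative
-- what changed: Inverts the direction of the search: instead of A's two phases over the use words (direct-overlap test, then a loop over the forward synonym table with an inner scan of the purpose words), B builds a reverse index synonym->canonical keyword and makes a single pass over the purpose words, asking for each whether it or its canonical keyword occurs among the use words.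
import Mathlib
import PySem

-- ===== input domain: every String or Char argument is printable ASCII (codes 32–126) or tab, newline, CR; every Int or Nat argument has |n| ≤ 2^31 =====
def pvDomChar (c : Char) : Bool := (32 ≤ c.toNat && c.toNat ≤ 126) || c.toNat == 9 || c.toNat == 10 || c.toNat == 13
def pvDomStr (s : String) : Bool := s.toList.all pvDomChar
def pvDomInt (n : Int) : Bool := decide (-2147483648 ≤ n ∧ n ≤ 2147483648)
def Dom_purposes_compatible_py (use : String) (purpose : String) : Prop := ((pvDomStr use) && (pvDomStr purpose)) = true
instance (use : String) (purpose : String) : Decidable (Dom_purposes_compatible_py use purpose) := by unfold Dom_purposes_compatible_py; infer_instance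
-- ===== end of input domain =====

-- B inverts the search direction: a reverse index synonym -> canonical keyword, then one pass
-- over the purpose words; objective: alternative decomposition of the same-cost task.

-- ===== PORT A =====
-- the literal dict from A, in insertion order
def pvMappings : PySem.Dict String (List String) :=
  ((((PySem.Dict.empty.insert "marketing" ["promotion", "advertising", "commercial"]).insert
      "analytics" ["analysis", "insights", "reporting"]).insert
      "support" ["service", "assistance", "help"]).insert
      "research" ["study", "investigation", "development"])

def purposes_compatible_py (use : String) (purpose : String) : Bool :=
  let use_words : PySem.Set String := PySem.Set.ofList (PySem.Str.split₀ use)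
  let purpose_words : PySem.Set String := PySem.Set.ofList (PySem.Str.split₀ purpose)
  -- if use_words & purpose_words: return True
  if !(PySem.Set.inter use_words purpose_words).isEmpty then true
  else
    -- for use_word in use_words: …  (any/True is independent of the set's iteration order)
    use_words.any (fun use_word =>
      if pvMappings.contains use_word then
        (pvMappings.getD use_word []).any (fun compat => purpose_words.contains compat)
      else false)

-- ===== PORT B =====
-- B's reverse index: synonym -> canonical use keyword
def pvCanonical : PySem.Dict String String :=
  PySem.Dict.ofList
    [("promotion", "marketing"), ("advertising", "marketing"), ("commercial", "marketing"),
     ("analysis", "analytics"), ("insights", "analytics"), ("reporting", "analytics"),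
     ("service", "support"), ("assistance", "support"), ("help", "support"),
     ("study", "research"), ("investigation", "research"), ("development", "research")]

def purposes_compatible_py_alt (use : String) (purpose : String) : Bool :=
  let use_words : PySem.Set String := PySem.Set.ofList (PySem.Str.split₀ use)
  -- any(w in use_words or canonical_of.get(w) in use_words for w in purpose.split())
  -- canonical_of.get(w) is None for unmapped w; 'None in use_words' is False: ported as the none branch
  (PySem.Str.split₀ purpose).any (fun w =>
    use_words.contains w ||
      (match pvCanonical.get? w with
       | some k => use_words.contains k
       | none => false))

-- ===== PRECONDITION & SPEC =====
def Spec_purposes_compatible_py (use : String) (purpose : String) (out : Bool) : Prop := out = purposes_compatible_py_alt use purpose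
instance (use : String) (purpose : String) (out : Bool) : Decidable (Spec_purposes_compatible_py use purpose out) := by unfold Spec_purposes_compatible_py; infer_instance

-- ===== CLAIM (what is proved, stated in full; the proofs are below) =====
def Claim_equal_purposes_compatible_py : Prop := ∀ (use : String) (purpose : String), Dom_purposes_compatible_py use purpose → Spec_purposes_compatible_py use purpose (purposes_compatible_py use purpose)

-- ===== LEMMAS AND PROOFS =====

-- nonemptiness of a set intersection is existence of a common member
theorem pv_inter_nonempty {t : PySem.Set String} (s : PySem.Set String) :
    (!(PySem.Set.inter s t).isEmpty) = true ↔ ∃ x ∈ s, x ∈ t := by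
  simp [PySem.Set.inter, PySem.Set.contains]

-- if a word is not a key of the dict, getD gives the default
theorem pv_getD_not_contains (w : String) (h : pvMappings.contains w = false) :
    pvMappings.getD w [] = [] :=
  PySem.Dict.getD_of_not_contains _ _ h

-- the reverse index is exactly the forward table read backwards
theorem pv_bridge (x w : String) :
    x ∈ pvMappings.getD w [] ↔ pvCanonical.get? x = some w := by
  constructor
  · intro h
    simp only [pvMappings, PySem.Dict.getD_insert, PySem.Dict.getD_empty] at h
    split_ifs at h with h1 h2 h3 h4
    · simp only [List.mem_cons, List.not_mem_nil, or_false] at h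
      rcases h with h | h | h <;> subst h <;> subst h1 <;> decide
    · simp only [List.mem_cons, List.not_mem_nil, or_false] at h
      rcases h with h | h | h <;> subst h <;> subst h2 <;> decide
    · simp only [List.mem_cons, List.not_mem_nil, or_false] at h
      rcases h with h | h | h <;> subst h <;> subst h3 <;> decide
    · simp only [List.mem_cons, List.not_mem_nil, or_false] at h
      rcases h with h | h | h <;> subst h <;> subst h4 <;> decide
    · exact absurd h (List.not_mem_nil)
  · intro h
    have hm : (x, w) ∈ pvCanonical.items := PySem.Dict.mem_items_of_get?_eq_some _ h
    have hit : pvCanonical.items =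
      [("promotion", "marketing"), ("advertising", "marketing"), ("commercial", "marketing"),
       ("analysis", "analytics"), ("insights", "analytics"), ("reporting", "analytics"),
       ("service", "support"), ("assistance", "support"), ("help", "support"),
       ("study", "research"), ("investigation", "research"), ("development", "research")] := by decide
    rw [hit] at hm
    simp only [List.mem_cons, List.not_mem_nil, or_false, Prod.mk.injEq] at hm
    rcases hm with ⟨hx, hw⟩ | ⟨hx, hw⟩ | ⟨hx, hw⟩ | ⟨hx, hw⟩ | ⟨hx, hw⟩ | ⟨hx, hw⟩ | ⟨hx, hw⟩ | ⟨hx, hw⟩ | ⟨hx, hw⟩ | ⟨hx, hw⟩ | ⟨hx, hw⟩ | ⟨hx, hw⟩ <;>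
      subst hx <;> subst hw <;> decide

-- A is true iff some purpose word is a use word or a synonym of one
theorem pv_A_iff (use purpose : String) :
    purposes_compatible_py use purpose = true ↔
      ∃ x ∈ PySem.Str.split₀ purpose,
        x ∈ PySem.Str.split₀ use ∨ ∃ w ∈ PySem.Str.split₀ use, x ∈ pvMappings.getD w [] := by
  unfold purposes_compatible_py
  dsimp only
  constructor
  · intro h
    split at h
    · rename_i hdir
      rw [pv_inter_nonempty] at hdir
      obtain ⟨x, hxs, hxt⟩ := hdir
      exact ⟨x, (PySem.Set.mem_ofList _ _).1 (by simpa using hxt),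
        Or.inl ((PySem.Set.mem_ofList _ _).1 hxs)⟩
    · simp only [List.any_eq_true] at h
      obtain ⟨w, hw, hcond⟩ := h
      split at hcond
      · simp only [List.any_eq_true, PySem.Set.contains] at hcond
        obtain ⟨c, hc, hcp⟩ := hcond
        exact ⟨c, by simpa using hcp, Or.inr ⟨w, (PySem.Set.mem_ofList _ _).1 hw, hc⟩⟩
      · exact absurd hcond (by simp)
  · rintro ⟨x, hxp, hc⟩
    rcases hc with hxu | ⟨w, hwu, hxw⟩
    · rw [if_pos]
      rw [pv_inter_nonempty]
      exact ⟨x, (PySem.Set.mem_ofList _ _).2 hxu, by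
        simpa using (PySem.Set.mem_ofList _ _).2 hxp⟩
    · split
      · rfl
      · simp only [List.any_eq_true]
        refine ⟨w, (PySem.Set.mem_ofList _ _).2 hwu, ?_⟩
        have hcont : pvMappings.contains w = true := by
          by_contra hc
          rw [Bool.not_eq_true] at hc
          rw [pv_getD_not_contains w hc] at hxw
          exact absurd hxw (List.not_mem_nil)
        rw [if_pos hcont]
        simp only [List.any_eq_true, PySem.Set.contains]
        exact ⟨x, hxw, by simpa using (PySem.Set.mem_ofList _ _).2 hxp⟩

-- B is true iff some purpose word is a use word or reverse-maps to one
theorem pv_B_iff (use purpose : String) :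
    purposes_compatible_py_alt use purpose = true ↔
      ∃ x ∈ PySem.Str.split₀ purpose,
        x ∈ PySem.Str.split₀ use ∨ ∃ k, pvCanonical.get? x = some k ∧ k ∈ PySem.Str.split₀ use := by
  unfold purposes_compatible_py_alt
  dsimp only
  simp only [List.any_eq_true, Bool.or_eq_true]
  constructor
  · rintro ⟨x, hx, hor⟩
    refine ⟨x, hx, ?_⟩
    rcases hor with h | h
    · exact Or.inl (by simpa [PySem.Set.contains, PySem.Set.mem_ofList] using h)
    · cases hg : pvCanonical.get? x with
      | none => rw [hg] at h; exact absurd h (by simp)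
      | some k =>
        rw [hg] at h
        exact Or.inr ⟨k, rfl, by simpa [PySem.Set.contains, PySem.Set.mem_ofList] using h⟩
  · rintro ⟨x, hx, hor⟩
    refine ⟨x, hx, ?_⟩
    rcases hor with h | ⟨k, hk, hku⟩
    · exact Or.inl (by simpa [PySem.Set.contains, PySem.Set.mem_ofList] using h)
    · refine Or.inr ?_
      rw [hk]
      simpa [PySem.Set.contains, PySem.Set.mem_ofList] using hku

-- ===== VERDICT (by name: the statement is the Claim_ definition above) =====
theorem purposes_compatible_py_spec : Claim_equal_purposes_compatible_py := by
  intro use purpose _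
  unfold Spec_purposes_compatible_py
  rw [Bool.eq_iff_iff, pv_A_iff, pv_B_iff]
  constructor
  · rintro ⟨x, hx, hc⟩
    refine ⟨x, hx, ?_⟩
    rcases hc with h | ⟨w, hw, hm⟩
    · exact Or.inl h
    · exact Or.inr ⟨w, (pv_bridge x w).1 hm, hw⟩
  · rintro ⟨x, hx, hc⟩
    refine ⟨x, hx, ?_⟩
    rcases hc with h | ⟨k, hk, hku⟩
    · exact Or.inl h
    · exact Or.inr ⟨k, hku, (pv_bridge x k).2 hk⟩
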